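-- pv_equiv track=rewrite | github.com/jbsmith-git/advent-of-code | 2024/day_05_part_02/__main__.py | count_rules_disobeyed
-- ===== SOURCE A (Python) =====
-- def count_rules_disobeyed(rules: set[tuple[int]], update: tuple[int]) -> int:
--
--     rules_disobeyed = 0
--     for rule in rules:
--
--         if rule[0] not in update or rule[1] not in update:
--             continue
--
--         if update.index(rule[0]) > update.index(rule[1]):
--             rules_disobeyed += 1
--
--     return rules_disobeyed
-- ===== SOURCE B (Python) =====
-- def count_rules_disobeyed(rules, update):
--     # Different decomposition: instead of scanning each rule against the update,
--     # enumerate ordered pairs of distinct update values (later value vs earlier value)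
--     # and add up how many rules each such inverted pair violates.
--     # distinct values of the update in first-occurrence order
--     order = list(dict.fromkeys(update))
--     # multiplicity of each (first, second) pair among the (complete) rules
--     pair_count = {}
--     for rule in rules:
--         if len(rule) >= 2:
--             key = (rule[0], rule[1])
--             pair_count[key] = pair_count.get(key, 0) + 1
--     # a rule (a, b) is disobeyed exactly when b first occurs before a does
--     total = 0
--     rest = order
--     while rest:
--         b, rest = rest[0], rest[1:]
--         for a in rest:
--             total += pair_count.get((a, b), 0)
--     return total
-- ===== Notes on version B (the rewrite author's own statement) =====
-- stated objective: alternative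
-- what changed: B inverts the iteration: it dedups the update into first-occurrence order, tallies rule pairs into a multiplicity dict once, and then counts by enumerating ordered pairs of distinct update values (earlier, later) and summing the multiplicity of each inverted pair, instead of A's per-rule membership tests and repeated .index scans.
import Mathlib
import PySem

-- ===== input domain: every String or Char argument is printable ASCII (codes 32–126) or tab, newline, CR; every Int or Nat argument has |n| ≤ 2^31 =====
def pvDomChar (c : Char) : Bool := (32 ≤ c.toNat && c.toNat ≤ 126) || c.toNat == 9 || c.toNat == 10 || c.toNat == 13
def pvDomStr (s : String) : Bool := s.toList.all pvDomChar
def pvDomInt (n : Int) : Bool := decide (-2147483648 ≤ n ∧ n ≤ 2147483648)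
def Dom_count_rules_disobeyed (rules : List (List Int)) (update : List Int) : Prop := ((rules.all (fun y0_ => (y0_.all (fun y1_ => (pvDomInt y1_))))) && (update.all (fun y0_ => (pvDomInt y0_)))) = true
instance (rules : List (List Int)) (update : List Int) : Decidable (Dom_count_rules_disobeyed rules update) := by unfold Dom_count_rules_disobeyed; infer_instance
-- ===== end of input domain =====

-- B inverts the iteration: it dedups the update, tallies rule pairs into a multiplicity
-- dict once, then sums that dict over the inverted ordered pairs of distinct update
-- values (objective: alternative decomposition). Return-value equivalence; no mutation.

-- ===== PORT A =====
def count_rules_disobeyed (rules : List (List Int)) (update : List Int) : Int :=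
  rules.foldl (fun rules_disobeyed rule =>
    match PySem.List.pyGet? rule 0 with
    | none => rules_disobeyed               -- rule[0] raises IndexError: excluded by Pre_
    | some a =>
      if a ∉ update then rules_disobeyed    -- `rule[0] not in update or …` short-circuits: continue
      else
        match PySem.List.pyGet? rule 1 with
        | none => rules_disobeyed           -- rule[1] raises IndexError: excluded by Pre_
        | some b =>
          if b ∉ update then rules_disobeyed
          else
            match PySem.List.index? update a, PySem.List.index? update b with
            | some ia, some ib => if ib < ia then rules_disobeyed + 1 else rules_disobeyed
            | _, _ => rules_disobeyed       -- unreachable: both are members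
    ) 0

-- ===== PORT B =====
-- the `while rest:` loop of Source B: peel off the earlier value b, sum the dict over (a, b)
-- for every later value a
def pvPairsLoop (pair_count : PySem.Dict (Int × Int) Int) : List Int → Int → Int
  | [], total => total
  | b :: rest, total =>
      pvPairsLoop pair_count rest (rest.foldl (fun t a => t + pair_count.getD (a, b) 0) total)

def count_rules_disobeyed_alt (rules : List (List Int)) (update : List Int) : Int :=
  -- order = list(dict.fromkeys(update))
  let order := PySem.List.dedup update
  -- pair_count[key] = pair_count.get(key, 0) + 1 for the complete rules
  let pair_count : PySem.Dict (Int × Int) Int :=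
    rules.foldl (fun d rule =>
      if 2 ≤ rule.length then
        d.insert (PySem.List.pyGetD rule 0 0, PySem.List.pyGetD rule 1 0)
          (d.getD (PySem.List.pyGetD rule 0 0, PySem.List.pyGetD rule 1 0) 0 + 1)
      else d) PySem.Dict.empty
  pvPairsLoop pair_count order 0

-- ===== PRECONDITION & SPEC =====
-- Pre_ excludes exactly the inputs on which the Python A raises IndexError: a rule shorter
-- than 2 elements, unless it is nonempty and its first element is absent from the update
-- (then the `or` short-circuits before rule[1] is read).
def Pre_count_rules_disobeyed (rules : List (List Int)) (update : List Int) : Prop :=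
  ∀ r ∈ rules, 2 ≤ r.length ∨ (r ≠ [] ∧ r.headI ∉ update)
instance (rules : List (List Int)) (update : List Int) : Decidable (Pre_count_rules_disobeyed rules update) := by unfold Pre_count_rules_disobeyed; infer_instance

def pvWitness_count_rules_disobeyed : List (List Int) × List Int :=
  ([[1, 2], [3, 1], [2, 3], [5]], [2, 1, 3])

def Spec_count_rules_disobeyed (rules : List (List Int)) (update : List Int) (out : Int) : Prop := out = count_rules_disobeyed_alt rules update
instance (rules : List (List Int)) (update : List Int) (out : Int) : Decidable (Spec_count_rules_disobeyed rules update out) := by unfold Spec_count_rules_disobeyed; infer_instance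

-- ===== CLAIM (what is proved, stated in full; the proofs are below) =====
def Claim_equal_count_rules_disobeyed : Prop := ∀ (rules : List (List Int)) (update : List Int), Dom_count_rules_disobeyed rules update → Pre_count_rules_disobeyed rules update → Spec_count_rules_disobeyed rules update (count_rules_disobeyed rules update)

-- ===== LEMMAS AND PROOFS =====

-- `pvCond update a b`: rule (a, b) is disobeyed — both values occur in the update and b's
-- first occurrence is strictly earlier than a's
def pvCond (update : List Int) (a b : Int) : Bool :=
  match List.idxOf? a update, List.idxOf? b update with
  | some ia, some ib => decide (ib < ia)
  | _, _ => false

-- the rule-level predicate both programs count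
def pvPA (update : List Int) (r : List Int) : Bool :=
  match PySem.List.pyGet? r 0, PySem.List.pyGet? r 1 with
  | some a, some b => pvCond update a b
  | _, _ => false

-- the (first, second) key Source B's tally extracts from a complete rule
def pvKey? (r : List Int) : Option (Int × Int) :=
  match r with
  | a :: b :: _ => some (a, b)
  | _ => none

-- the list of inverted pairs (a, b) with b strictly before a in l (what Source B's nested loop visits)
def pvPairList : List Int → List (Int × Int)
  | [] => []
  | b :: rest => rest.map (fun a => (a, b)) ++ pvPairList rest

-- ---- A side: the fold counts pvPA ----
theorem pvA_eq (rules : List (List Int)) (update : List Int) :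
    count_rules_disobeyed rules update = (rules.countP (pvPA update) : Int) := by
  unfold count_rules_disobeyed
  rw [PySem.List.foldl_congr_mem (g := fun acc r => if pvPA update r then acc + 1 else acc)]
  · rw [PySem.List.foldl_if_add_one]; ring
  · intro acc r _
    unfold pvPA pvCond
    cases h0 : PySem.List.pyGet? r 0 with
    | none => simp
    | some a =>
      cases h1 : PySem.List.pyGet? r 1 with
      | none => simp
      | some b =>
        by_cases ha : a ∈ update
        · by_cases hb : b ∈ update
          · have hia := (PySem.List.index?_isSome_iff update a).mpr ha
            have hib := (PySem.List.index?_isSome_iff update b).mpr hb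
            obtain ⟨ia, hia⟩ := Option.isSome_iff_exists.mp hia
            obtain ⟨ib, hib⟩ := Option.isSome_iff_exists.mp hib
            have hia' : List.idxOf? a update = some ia := by
              rw [← PySem.List.index?_eq_idxOf?]; exact hia
            have hib' : List.idxOf? b update = some ib := by
              rw [← PySem.List.index?_eq_idxOf?]; exact hib
            simp only [ha, hb, hia, hib, hia', hib', not_true]
            by_cases hlt : ib < ia <;> simp [hlt]
          · have : List.idxOf? b update = none := by
              rw [← PySem.List.index?_eq_idxOf?, PySem.List.index?_eq_none_iff]; exact hb
            simp [ha, hb, this]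
        · have : List.idxOf? a update = none := by
            rw [← PySem.List.index?_eq_idxOf?, PySem.List.index?_eq_none_iff]; exact ha
          simp [ha, this]

-- ---- B side, step 1: the guarded tally fold is the Counter of the extracted keys ----
theorem pvTally_eq_counter (rules : List (List Int)) (d : PySem.Dict (Int × Int) Int) :
    rules.foldl (fun d rule =>
      if 2 ≤ rule.length then
        d.insert (PySem.List.pyGetD rule 0 0, PySem.List.pyGetD rule 1 0)
          (d.getD (PySem.List.pyGetD rule 0 0, PySem.List.pyGetD rule 1 0) 0 + 1)
      else d) d
    = (rules.filterMap pvKey?).foldl (fun d k => d.insert k (d.getD k 0 + 1)) d := by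
  induction rules generalizing d with
  | nil => rfl
  | cons r rs ih =>
    match r with
    | [] => simpa [pvKey?] using ih d
    | [a] => simpa [pvKey?] using ih d
    | a :: b :: t =>
      have h2 : 2 ≤ (a :: b :: t).length := by simp
      have e0 : PySem.List.pyGetD (a :: b :: t) 0 0 = a := by simp [pysem]
      have e1 : PySem.List.pyGetD (a :: b :: t) 1 0 = b := by
        rw [PySem.List.pyGetD_ofNat']
        rfl
      simp only [List.foldl_cons, List.filterMap_cons, pvKey?, if_pos h2, e0, e1]
      exact ih _

-- ---- B side, step 2: the pair loop sums the dict over pvPairList ----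
theorem pvPairsLoop_eq (d : PySem.Dict (Int × Int) Int) (l : List Int) (t : Int) :
    pvPairsLoop d l t = t + ((pvPairList l).map (fun p => d.getD p 0)).sum := by
  induction l generalizing t with
  | nil => simp [pvPairsLoop, pvPairList]
  | cons b rest ih =>
    rw [pvPairsLoop, ih, PySem.List.foldl_add]
    simp only [pvPairList, List.map_append, List.sum_append, List.map_map, Function.comp_def]
    ring

-- ---- counting toolbox ----
-- sum of the indicator of k over P is the number of occurrences of k in P
theorem pvSum_indicator {β : Type} [BEq β] [LawfulBEq β] (P : List β) (k : β) :
    (P.map (fun p => if p == k then (1 : Nat) else 0)).sum = P.count k := by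
  induction P with
  | nil => simp
  | cons q Q ih =>
    simp only [List.map_cons, List.sum_cons, List.count_cons, ih]
    by_cases hq : q = k
    · subst hq; simp [Nat.add_comm]
    · have b1 : (q == k) = false := by simpa using hq
      simp [b1]

-- sum over P of counts in K = sum over K of counts in P (the double-counting exchange)
theorem pvSum_count_comm {β : Type} [BEq β] [LawfulBEq β] (P K : List β) :
    (P.map (fun p => K.count p)).sum = (K.map (fun k => P.count k)).sum := by
  induction K with
  | nil => simp
  | cons k K ih =>
    simp only [List.map_cons, List.sum_cons]
    have h1 : (P.map (fun p => (k :: K).count p)).sum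
        = (P.map (fun p => K.count p)).sum + (P.map (fun p => if p == k then (1 : Nat) else 0)).sum := by
      rw [← List.sum_map_add]
      congr 1
      apply List.map_congr_left
      intro p _
      rw [List.count_cons]
      congr 1
      by_cases hp : p = k
      · subst hp; simp
      · have b1 : (p == k) = false := by simpa using hp
        have b2 : (k == p) = false := by simpa using (Ne.symm hp)
        simp [b1, b2]
    rw [h1, pvSum_indicator, ih]
    omega

-- sum of if-indicators is countP
theorem pvSum_if_countP {β : Type} (l : List β) (p : β → Bool) :
    (l.map (fun x => if p x then (1 : Nat) else 0)).sum = l.countP p := by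
  induction l with
  | nil => simp
  | cons x xs ih =>
    simp only [List.map_cons, List.sum_cons, List.countP_cons, ih]
    by_cases h : p x <;> simp [h]
    omega

-- countP over filterMap
theorem pvCountP_filterMap {α β : Type} (f : α → Option β) (p : β → Bool) (l : List α) :
    (l.filterMap f).countP p = l.countP (fun x => (f x).elim false p) := by
  induction l with
  | nil => rfl
  | cons x xs ih =>
    cases h : f x with
    | none => simp [h, ih]
    | some b => simp [h, List.countP_cons, ih]

-- sum of Int-casts
theorem pvSum_cast (l : List (Int × Int)) (f : Int × Int → Nat) :
    (l.map (fun p => ((f p : Nat) : Int))).sum = (((l.map f).sum : Nat) : Int) := by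
  induction l with
  | nil => simp
  | cons x xs ih => simp [ih]

-- ---- first-occurrence index facts for the append-singleton induction ----
theorem pvIdx_append_of_mem (u : List Int) (x y : Int) (hy : y ∈ u) :
    List.idxOf? y (u ++ [x]) = List.idxOf? y u := by
  have := PySem.List.index?_append_of_mem (l := u) [x] (v := y) hy
  simpa [PySem.List.index?_eq_idxOf?] using this

theorem pvIdx_append_none (u : List Int) (x y : Int) (hy : y ∉ u) (hyx : y ≠ x) :
    List.idxOf? y (u ++ [x]) = none := by
  rw [List.idxOf?_eq_none_iff]
  simp [hy, hyx]

theorem pvIdx_append_self (u : List Int) (x : Int) (hx : x ∉ u) :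
    List.idxOf? x (u ++ [x]) = some u.length := by
  have := PySem.List.index?_append_singleton_self u x hx
  simpa [PySem.List.index?_eq_idxOf?] using this

theorem pvPairList_count_append (o : List Int) (x : Int) (p : Int × Int) :
    (pvPairList (o ++ [x])).count p
      = (pvPairList o).count p + (o.map (fun b => (x, b))).count p := by
  induction o with
  | nil => simp [pvPairList]
  | cons b o' ih =>
    simp only [List.cons_append, pvPairList, List.map_append, List.count_append, ih,
      List.map_cons, List.count_cons]
    simp
    omega

theorem pvMapCount (o : List Int) (x a b : Int) :
    ((o.map (fun b' => (x, b'))).count (a, b)) = if a = x then o.count b else 0 := by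
  induction o with
  | nil => simp
  | cons c o' ih =>
    simp only [List.map_cons, List.count_cons, ih]
    by_cases hax : a = x
    · subst hax
      by_cases hbc : b = c
      · subst hbc; simp
      · simp
    · simp [hax]
      intro h
      exact absurd h.symm hax

-- ---- the crux: each inverted pair of the dedup'd update appears exactly once, and
-- it appears iff the rule (a, b) is disobeyed in the original update ----
theorem pvCrux (update : List Int) (a b : Int) :
    (pvPairList (PySem.List.dedup update)).count (a, b)
      = if pvCond update a b then 1 else 0 := by
  induction update using List.reverseRecOn generalizing a b with
  | nil => simp [PySem.List.dedup, pvPairList, pvCond, PySem.Set.ofList]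
  | append_singleton u x ih =>
    by_cases hx : x ∈ u
    · have e1 : PySem.List.dedup (u ++ [x]) = PySem.List.dedup u := by
        simp only [PySem.List.dedup_eq_ofList, PySem.Set.ofList_append_singleton]
        exact PySem.Set.add_of_mem ((PySem.Set.mem_ofList u x).mpr hx)
      have e2 : pvCond (u ++ [x]) a b = pvCond u a b := by
        unfold pvCond
        by_cases hau : a ∈ u
        · rw [pvIdx_append_of_mem u x a hau]
          by_cases hbu : b ∈ u
          · rw [pvIdx_append_of_mem u x b hbu]
          · have hbx : b ≠ x := fun h => hbu (h ▸ hx)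
            rw [pvIdx_append_none u x b hbu hbx,
              List.idxOf?_eq_none_iff.mpr hbu]
        · have hax : a ≠ x := fun h => hau (h ▸ hx)
          rw [pvIdx_append_none u x a hau hax, List.idxOf?_eq_none_iff.mpr hau]
      rw [e1, e2, ih]
    · have e1 : PySem.List.dedup (u ++ [x]) = PySem.List.dedup u ++ [x] := by
        simp only [PySem.List.dedup_eq_ofList, PySem.Set.ofList_append_singleton]
        exact PySem.Set.add_of_not_mem (fun h => hx ((PySem.Set.mem_ofList u x).mp h))
      rw [e1, pvPairList_count_append, pvMapCount, ih a b]
      have hxnone : List.idxOf? x u = none := List.idxOf?_eq_none_iff.mpr hx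
      by_cases hax : a = x
      · subst hax
        -- first term is 0: pvCond u a b is false since idxOf? a u = none
        rw [show pvCond u a b = false by unfold pvCond; rw [hxnone]]
        rw [if_neg (by simp), if_pos rfl]
        unfold pvCond
        rw [pvIdx_append_self u a hx]
        by_cases hbu : b ∈ u
        · obtain ⟨ib, hib⟩ := Option.isSome_iff_exists.mp
            ((PySem.List.index?_isSome_iff u b).mpr hbu)
          have hib' : List.idxOf? b u = some ib := by
            rw [← PySem.List.index?_eq_idxOf?]; exact hib
          obtain ⟨hlt, -⟩ := PySem.List.getElem_of_index?_eq_some hib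
          rw [pvIdx_append_of_mem u a b hbu, hib']
          have hcnt : (PySem.List.dedup u).count b = 1 :=
            List.count_eq_one_of_mem (PySem.List.nodup_dedup u)
              ((PySem.List.mem_dedup u b).mpr hbu)
          rw [hcnt]
          simp [hlt]
        · have hcnt : (PySem.List.dedup u).count b = 0 :=
            List.count_eq_zero.mpr (fun h => hbu ((PySem.List.mem_dedup u b).mp h))
          rw [hcnt]
          by_cases hbx : b = a
          · subst hbx
            rw [pvIdx_append_self u b hx]
            simp
          · rw [pvIdx_append_none u a b hbu hbx]
            simp
      · rw [if_neg hax]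
        have e2 : pvCond (u ++ [x]) a b = pvCond u a b := by
          unfold pvCond
          by_cases hau : a ∈ u
          · rw [pvIdx_append_of_mem u x a hau]
            obtain ⟨ia, hia⟩ := Option.isSome_iff_exists.mp
              ((PySem.List.index?_isSome_iff u a).mpr hau)
            have hia' : List.idxOf? a u = some ia := by
              rw [← PySem.List.index?_eq_idxOf?]; exact hia
            obtain ⟨hlta, -⟩ := PySem.List.getElem_of_index?_eq_some hia
            by_cases hbu : b ∈ u
            · rw [pvIdx_append_of_mem u x b hbu]
            · by_cases hbx : b = x
              · subst hbx
                rw [pvIdx_append_self u b hx, hia', List.idxOf?_eq_none_iff.mpr hbu]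
                simp
                omega
              · rw [pvIdx_append_none u x b hbu hbx, List.idxOf?_eq_none_iff.mpr hbu]
          · rw [pvIdx_append_none u x a hau hax, List.idxOf?_eq_none_iff.mpr hau]
        rw [e2]
        omega

-- ---- B side, assembled ----
theorem pvB_eq (rules : List (List Int)) (update : List Int) :
    count_rules_disobeyed_alt rules update = (rules.countP (pvPA update) : Int) := by
  unfold count_rules_disobeyed_alt
  rw [pvTally_eq_counter, PySem.Dict.foldl_insert_getD_add_one_eq_counter, pvPairsLoop_eq]
  have e1 : ((pvPairList (PySem.List.dedup update)).map
        (fun p => (PySem.Dict.counter (rules.filterMap pvKey?)).getD p 0)).sum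
      = ((pvPairList (PySem.List.dedup update)).map
        (fun p => (((rules.filterMap pvKey?).count p : Nat) : Int))).sum := by
    congr 1
    apply List.map_congr_left
    intro p _
    rw [PySem.Dict.getD_counter]
  rw [e1, pvSum_cast, pvSum_count_comm]
  have e2 : ((rules.filterMap pvKey?).map
        (fun k => (pvPairList (PySem.List.dedup update)).count k)).sum
      = ((rules.filterMap pvKey?).map
        (fun k => if pvCond update k.1 k.2 then (1 : Nat) else 0)).sum := by
    congr 1
    apply List.map_congr_left
    intro k _
    rw [show k = (k.1, k.2) from rfl, pvCrux]
  rw [e2, pvSum_if_countP, pvCountP_filterMap]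
  have e3 : rules.countP (fun r => (pvKey? r).elim false (fun k => pvCond update k.1 k.2))
      = rules.countP (pvPA update) := by
    apply List.countP_congr
    intro r _
    match r with
    | [] => simp [pvKey?, pvPA, pysem]
    | [a] => simp [pvKey?, pvPA, pysem]
    | a :: b :: t => simp [pvKey?, pvPA, pysem]
  rw [e3]
  ring

-- ===== VERDICT (by name: the statement is the Claim_ definition above) =====
theorem count_rules_disobeyed_spec : Claim_equal_count_rules_disobeyed := by
  intro rules update _ _
  unfold Spec_count_rules_disobeyed
  rw [pvA_eq, pvB_eq]
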